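-- pv_equiv track=rewrite | github.com/willmiao/ComfyUI-Lora-Manager | py/utils/civitai_utils.py | _resolve_commercial_bits
-- ===== SOURCE A (Python) =====
-- from typing import Any, Dict, Iterable, Mapping, Sequence
--
-- _COMMERCIAL_ALLOWED_VALUES = {"sell", "rent", "rentcivit", "image"}
--
-- _COMMERCIAL_SHIFT = 1
--
-- def _resolve_commercial_bits(values: Sequence[str]) -> int:
--     normalized_values = set()
--     for value in values:
--         normalized = str(value).strip().lower().replace("_", "").replace("-", "")
--         if normalized in _COMMERCIAL_ALLOWED_VALUES:
--             normalized_values.add(normalized)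
--
--     has_sell = "sell" in normalized_values
--     has_rent = has_sell or "rent" in normalized_values
--     has_rentcivit = has_rent or "rentcivit" in normalized_values
--     has_image = has_sell or "image" in normalized_values
--
--     commercial_bits = (
--         (1 if has_sell else 0) << 3
--         | (1 if has_rent else 0) << 2
--         | (1 if has_rentcivit else 0) << 1
--         | (1 if has_image else 0)
--     )
--     return commercial_bits << _COMMERCIAL_SHIFT
-- ===== SOURCE B (Python) =====
-- _COMMERCIAL_RANK = {"sell": 3, "rent": 2, "rentcivit": 1}
--
-- _COMMERCIAL_LEVEL_BITS = (0, 2, 6, 15)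
--
-- _COMMERCIAL_SHIFT = 1
--
-- def _normalize(value):
--     return str(value).strip().lower().replace("_", "").replace("-", "")
--
-- def _resolve_commercial_bits(values):
--     # Rank the strongest commercial permission seen (sell > rent > rentcivit);
--     # the cascade is then just a 4-entry table, with the independent image bit OR-ed in.
--     normalized = [_normalize(v) for v in values]
--     rank = max((_COMMERCIAL_RANK.get(n, 0) for n in normalized), default=0)
--     image = "image" in normalized
--     return (_COMMERCIAL_LEVEL_BITS[rank] | (1 if image else 0)) << _COMMERCIAL_SHIFT
-- ===== Notes on version B (the rewrite author's own statement) =====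
-- stated objective: alternative
-- what changed: Replaces A's set-of-normalized-strings plus the four-boolean implication cascade by a max-of-ranks algorithm: normalize all values, take the maximum permission rank (sell=3 > rent=2 > rentcivit=1), look the final bit pattern up in a 4-entry level table, and OR in the independent image bit before the shift.
import Mathlib
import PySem

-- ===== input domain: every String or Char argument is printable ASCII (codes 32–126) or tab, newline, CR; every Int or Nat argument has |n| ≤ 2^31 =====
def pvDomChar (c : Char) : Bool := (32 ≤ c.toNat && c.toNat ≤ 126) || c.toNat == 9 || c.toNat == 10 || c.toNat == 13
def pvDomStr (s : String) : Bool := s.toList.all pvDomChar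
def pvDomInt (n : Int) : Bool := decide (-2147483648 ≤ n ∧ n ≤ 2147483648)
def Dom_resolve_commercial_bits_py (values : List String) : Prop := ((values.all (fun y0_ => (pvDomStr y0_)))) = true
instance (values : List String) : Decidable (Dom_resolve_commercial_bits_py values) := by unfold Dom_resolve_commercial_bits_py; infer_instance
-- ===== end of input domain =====

-- B replaces A's set-of-strings plus boolean implication cascade by a max-of-ranks
-- algorithm with a 4-entry level table plus an independent image bit (alternative, same cost).

-- shared normalization: str(value).strip().lower().replace("_", "").replace("-", "")
def pvNormalize (s : String) : String :=
  PySem.Str.replace (PySem.Str.replace (PySem.Str.lower (PySem.Str.strip s)) "_" "") "-" ""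

-- ===== PORT A =====
def pvAllowed : PySem.Set String := PySem.Set.ofList ["sell", "rent", "rentcivit", "image"]

def resolve_commercial_bits_py (values : List String) : Int :=
  let normalized_values : PySem.Set String :=
    values.foldl (fun acc value =>
      let normalized := pvNormalize value
      if PySem.Set.contains pvAllowed normalized then PySem.Set.add acc normalized else acc)
      PySem.Set.empty
  let has_sell := PySem.Set.contains normalized_values "sell"
  let has_rent := has_sell || PySem.Set.contains normalized_values "rent"
  let has_rentcivit := has_rent || PySem.Set.contains normalized_values "rentcivit"
  let has_image := has_sell || PySem.Set.contains normalized_values "image"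
  let commercial_bits : Int :=
    Int.lor (Int.lor (Int.lor (Int.shiftLeft (if has_sell then 1 else 0) 3)
      (Int.shiftLeft (if has_rent then 1 else 0) 2))
      (Int.shiftLeft (if has_rentcivit then 1 else 0) 1))
      (if has_image then 1 else 0)
  Int.shiftLeft commercial_bits 1

-- ===== PORT B =====
def pvRank : PySem.Dict String Int :=
  PySem.Dict.ofList [("sell", 3), ("rent", 2), ("rentcivit", 1)]

def pvLevelBits : List Int := [0, 2, 6, 15]

def resolve_commercial_bits_py_alt (values : List String) : Int :=
  let normalized := values.map pvNormalize
  let rank : Int := normalized.foldl (fun m n => max m (PySem.Dict.getD pvRank n 0)) 0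
  let image := normalized.contains "image"
  -- rank is always 0..3, so the tuple index never raises; pyGet? mirrors the indexing
  Int.shiftLeft (Int.lor ((PySem.List.pyGet? pvLevelBits rank).getD 0) (if image then 1 else 0)) 1

-- ===== PRECONDITION & SPEC =====
def Spec_resolve_commercial_bits_py (values : List String) (out : Int) : Prop := out = resolve_commercial_bits_py_alt values
instance (values : List String) (out : Int) : Decidable (Spec_resolve_commercial_bits_py values out) := by unfold Spec_resolve_commercial_bits_py; infer_instance

-- ===== CLAIM (what is proved, stated in full; the proofs are below) =====
def Claim_equal_resolve_commercial_bits_py : Prop := ∀ (values : List String), Dom_resolve_commercial_bits_py values → Spec_resolve_commercial_bits_py values (resolve_commercial_bits_py values)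

-- ===== LEMMAS AND PROOFS =====

-- the four "was this tag seen" booleans both programs are a function of
def pvB (l : List String) (k : String) : Bool := l.any (fun v => pvNormalize v == k)

def pvRankN (s : String) : Int :=
  if s = "sell" then 3 else if s = "rent" then 2 else if s = "rentcivit" then 1 else 0

-- the maximum rank over a list, expressed by the three seen-booleans
def pvR (l : List String) : Int :=
  if pvB l "sell" then 3 else if pvB l "rent" then 2 else if pvB l "rentcivit" then 1 else 0

lemma pvGetD_rank (k : String) : PySem.Dict.getD pvRank k 0 = pvRankN k := by
  simp only [pvRankN]
  split_ifs with h1 h2 h3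
  · subst h1; decide
  · subst h2; decide
  · subst h3; decide
  · apply PySem.Dict.getD_of_not_contains
    rw [PySem.Dict.contains_eq_decide_mem_keys]
    simp [show pvRank.keys = ["sell", "rent", "rentcivit"] from by decide, h1, h2, h3]

lemma pvR_nonneg (l : List String) : 0 ≤ pvR l := by
  simp only [pvR]; split_ifs <;> norm_num

lemma pvR_cons (v : String) (t : List String) :
    pvR (v :: t) = max (pvRankN (pvNormalize v)) (pvR t) := by
  have hB : ∀ k, pvB (v :: t) k = ((pvNormalize v == k) || pvB t k) := by
    intro k; simp [pvB]
  simp only [pvR, pvRankN, hB]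
  by_cases h1 : pvNormalize v = "sell" <;>
    by_cases h2 : pvNormalize v = "rent" <;>
      by_cases h3 : pvNormalize v = "rentcivit" <;>
        simp_all <;>
          cases pvB t "sell" <;> cases pvB t "rent" <;> cases pvB t "rentcivit" <;> simp

lemma pvFoldMax (l : List String) (acc : Int) (hacc : 0 ≤ acc) :
    (l.map pvNormalize).foldl (fun m n => max m (PySem.Dict.getD pvRank n 0)) acc
      = max acc (pvR l) := by
  induction l generalizing acc with
  | nil =>
      simp only [List.map_nil, List.foldl_nil, pvR, pvB, List.any_nil]
      simp; omega
  | cons v t ih =>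
      rw [List.map_cons, List.foldl_cons, pvGetD_rank,
          ih (max acc (pvRankN (pvNormalize v))) (le_trans hacc (le_max_left _ _)),
          pvR_cons]
      omega

lemma pvContains_image (values : List String) :
    (values.map pvNormalize).contains "image" = pvB values "image" := by
  simp [pvB, List.any_eq]

lemma pvContainsAddSelf (s : PySem.Set String) (x : String) :
    (PySem.Set.add s x).contains x = true := by
  simp [PySem.Set.contains_eq_listContains, PySem.Set.mem_add]

lemma pvContainsAddNe (s : PySem.Set String) (x y : String) (h : y ≠ x) :
    (PySem.Set.add s y).contains x = s.contains x := by
  simp [PySem.Set.contains_eq_listContains, PySem.Set.mem_add, h.symm]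

-- A's loop: membership of an allowed tag in the accumulated set
lemma pvFoldA_mem (l : List String) (s : PySem.Set String) (k : String)
    (hk : PySem.Set.contains pvAllowed k = true) :
    PySem.Set.contains
      (l.foldl (fun acc value =>
        let normalized := pvNormalize value
        if PySem.Set.contains pvAllowed normalized then PySem.Set.add acc normalized else acc) s) k
      = (PySem.Set.contains s k || pvB l k) := by
  induction l generalizing s with
  | nil => simp only [List.foldl_nil, pvB, List.any_nil, Bool.or_false]
  | cons v t ih =>
      have hB : pvB (v :: t) k = ((pvNormalize v == k) || pvB t k) := by
        simp only [pvB, List.any_cons]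
      rw [List.foldl_cons, ih, hB]
      generalize pvNormalize v = n
      by_cases hnk : n = k
      · rw [hnk, if_pos hk, pvContainsAddSelf]
        simp only [Bool.true_or, beq_self_eq_true, Bool.or_true]
      · have hne : (n == k) = false := beq_eq_false_iff_ne.mpr hnk
        rw [hne, Bool.false_or]
        by_cases hall : PySem.Set.contains pvAllowed n = true
        · rw [if_pos hall, pvContainsAddNe s k n hnk]
        · rw [if_neg hall]

-- A's output as a function of the four seen-booleans
lemma pvA_eq (values : List String) :
    resolve_commercial_bits_py values =
      (let b8 := pvB values "sell"; let b4 := pvB values "rent";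
       let b2 := pvB values "rentcivit"; let b1 := pvB values "image"
       Int.shiftLeft
         (Int.lor (Int.lor (Int.lor (Int.shiftLeft (if b8 then 1 else 0) 3)
           (Int.shiftLeft (if b8 || b4 then 1 else 0) 2))
           (Int.shiftLeft (if (b8 || b4) || b2 then 1 else 0) 1))
           (if b8 || b1 then 1 else 0)) 1) := by
  simp only [resolve_commercial_bits_py]
  rw [pvFoldA_mem values PySem.Set.empty "sell" (by decide),
      pvFoldA_mem values PySem.Set.empty "rent" (by decide),
      pvFoldA_mem values PySem.Set.empty "rentcivit" (by decide),
      pvFoldA_mem values PySem.Set.empty "image" (by decide)]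
  simp [PySem.Set.empty, PySem.Set.contains_eq_listContains]

-- B's output by the same booleans: rank collapses to pvR, the tuple index to the table
lemma pvB_eq (values : List String) :
    resolve_commercial_bits_py_alt values =
      Int.shiftLeft
        (Int.lor ((PySem.List.pyGet? pvLevelBits (pvR values)).getD 0)
          (if pvB values "image" then 1 else 0)) 1 := by
  simp only [resolve_commercial_bits_py_alt]
  rw [pvFoldMax values 0 le_rfl, pvContains_image]
  have : max (0 : Int) (pvR values) = pvR values := max_eq_right (pvR_nonneg values)
  rw [this]

-- ===== VERDICT (by name: the statement is the Claim_ definition above) =====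
theorem resolve_commercial_bits_py_spec : Claim_equal_resolve_commercial_bits_py := by
  intro values _
  unfold Spec_resolve_commercial_bits_py
  rw [pvA_eq values, pvB_eq values]
  simp only [pvR]
  cases pvB values "sell" <;> cases pvB values "rent" <;>
    cases pvB values "rentcivit" <;> cases pvB values "image" <;> decide
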